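-- pv_equiv track=rewrite | github.com/jonel-richardson/ECHO | backend/subagents/state_context.py | _select_state_qi_facts
-- ===== SOURCE A (Python) =====
-- from typing import Dict, List, Optional, Set, Tuple
--
-- GENERAL_TAG = "general"
--
-- def _select_state_qi_facts(facts: List[dict], complication_tags: Set[str]) -> List[dict]:
--     """Pick exactly two distinct facts: one general-tagged + one complication match.
--
--     Falls back to a second general-tagged fact (if no complication match) and
--     finally to the first un-picked fact in JSON order. Returned facts preserve
--     JSON order so downstream rendering is deterministic.
--     """
--     if len(facts) < 2:
--         return facts
--
--     general_idx: Optional[int] = None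
--     for i, fact in enumerate(facts):
--         if GENERAL_TAG in fact.get("relevance_tags", []):
--             general_idx = i
--             break
--
--     second_idx: Optional[int] = None
--     if complication_tags:
--         for i, fact in enumerate(facts):
--             if i == general_idx:
--                 continue
--             if set(fact.get("relevance_tags", [])) & complication_tags:
--                 second_idx = i
--                 break
--
--     if second_idx is None:
--         for i, fact in enumerate(facts):
--             if i == general_idx:
--                 continue
--             if GENERAL_TAG in fact.get("relevance_tags", []):
--                 second_idx = i
--                 break
--
--     if second_idx is None:
--         for i in range(len(facts)):
--             if i != general_idx:
--                 second_idx = i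
--                 break
--
--     selected = sorted({idx for idx in (general_idx, second_idx) if idx is not None})
--     return [facts[i] for i in selected]
-- ===== SOURCE B (Python) =====
-- GENERAL_TAG = "general"
--
-- def _select_state_qi_facts(facts, complication_tags):
--     """One indexing pass + direct selection instead of three restarting scans."""
--     if len(facts) < 2:
--         return facts
--
--     general_idxs = []
--     comp_idxs = []
--     for i, fact in enumerate(facts):
--         tags = fact.get("relevance_tags", [])
--         if GENERAL_TAG in tags:
--             general_idxs.append(i)
--         if complication_tags and not complication_tags.isdisjoint(tags):
--             comp_idxs.append(i)
--
--     g = general_idxs[0] if general_idxs else None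
--     second = next((i for i in comp_idxs if i != g), None)
--     if second is None:
--         second = next((i for i in general_idxs if i != g), None)
--     if second is None:
--         second = next(i for i in range(len(facts)) if i != g)
--
--     if g is None:
--         return [facts[second]]
--     lo, hi = (g, second) if g < second else (second, g)
--     return [facts[lo], facts[hi]]
-- ===== Notes on version B (the rewrite author's own statement) =====
-- stated objective: simpler
-- what changed: Replaces A's three restarting index scans and the sorted-set assembly with one enumeration pass that builds general/complication index lists, then picks the pair by first-match selection and emits it directly in order.
import Mathlib
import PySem

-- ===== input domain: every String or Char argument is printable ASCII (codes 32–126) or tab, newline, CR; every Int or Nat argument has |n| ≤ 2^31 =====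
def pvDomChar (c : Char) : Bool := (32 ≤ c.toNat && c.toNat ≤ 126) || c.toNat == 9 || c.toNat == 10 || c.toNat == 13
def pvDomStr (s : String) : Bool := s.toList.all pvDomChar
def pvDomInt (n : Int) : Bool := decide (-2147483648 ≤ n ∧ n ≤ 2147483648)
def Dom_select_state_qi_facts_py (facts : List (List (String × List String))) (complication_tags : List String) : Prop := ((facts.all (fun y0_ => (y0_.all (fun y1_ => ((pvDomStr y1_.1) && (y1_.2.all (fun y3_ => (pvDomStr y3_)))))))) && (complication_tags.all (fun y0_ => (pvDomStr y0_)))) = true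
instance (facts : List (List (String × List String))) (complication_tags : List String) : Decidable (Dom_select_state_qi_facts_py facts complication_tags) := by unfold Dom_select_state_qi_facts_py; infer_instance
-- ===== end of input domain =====

-- B replaces A's three restarting scans with one indexing pass plus direct first-match selection (objective: simpler).

-- ===== PORT A =====
-- fact.get("relevance_tags", []) — dicts arrive as assoc lists; PySem.Dict.ofList reproduces dict(...) (last duplicate wins)
def pvTags (fact : List (String × List String)) : List String :=
  (PySem.Dict.ofList fact).getD "relevance_tags" []

-- first loop: first index whose tags contain "general"
def aFindGen : List (List (String × List String)) → Nat → Option Nat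
  | [], _ => none
  | f :: rest, i => if (pvTags f).contains "general" then some i else aFindGen rest (i + 1)

-- second loop: first index ≠ general_idx whose tag set meets complication_tags
def aFindComp (ct : List String) (g : Option Nat) : List (List (String × List String)) → Nat → Option Nat
  | [], _ => none
  | f :: rest, i =>
    if some i = g then aFindComp ct g rest (i + 1)
    else if (pvTags f).any (fun t => ct.contains t) then some i
    else aFindComp ct g rest (i + 1)

-- third loop: first index ≠ general_idx whose tags contain "general"
def aFindGen2 (g : Option Nat) : List (List (String × List String)) → Nat → Option Nat
  | [], _ => none
  | f :: rest, i =>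
    if some i = g then aFindGen2 g rest (i + 1)
    else if (pvTags f).contains "general" then some i
    else aFindGen2 g rest (i + 1)

-- fourth loop: first index in range(len(facts)) that differs from general_idx
def aFindIdx (g : Option Nat) : List Nat → Option Nat
  | [] => none
  | i :: rest => if some i ≠ g then some i else aFindIdx g rest

def select_state_qi_facts_py (facts : List (List (String × List String))) (complication_tags : List String) : List (List (String × List String)) :=
  if facts.length < 2 then facts
  else
    let general_idx := aFindGen facts 0
    let s₁ : Option Nat := if !complication_tags.isEmpty then aFindComp complication_tags general_idx facts 0 else none
    let s₂ : Option Nat := match s₁ with | none => aFindGen2 general_idx facts 0 | some j => some j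
    let s₃ : Option Nat := match s₂ with | none => aFindIdx general_idx (List.range facts.length) | some j => some j
    -- sorted({idx for idx in (general_idx, second_idx) if idx is not None})
    let selected := PySem.List.sorted (PySem.Set.ofList (([general_idx, s₃].filterMap id))) (fun x => x) false
    selected.map (fun i => facts.getD i [])   -- facts[i]; i is always in range here

-- ===== PORT B =====
-- one pass: (general-tagged indices, complication-matching indices), in order
def bScan (ct : List String) : List (List (String × List String)) → Nat → List Nat × List Nat
  | [], _ => ([], [])
  | f :: rest, i =>
    let p := bScan ct rest (i + 1)
    let tags := pvTags f
    ((if tags.contains "general" then i :: p.1 else p.1),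
     (if !ct.isEmpty && tags.any (fun t => ct.contains t) then i :: p.2 else p.2))

def select_state_qi_facts_py_alt (facts : List (List (String × List String))) (complication_tags : List String) : List (List (String × List String)) :=
  if facts.length < 2 then facts
  else
    let p := bScan complication_tags facts 0
    let g := p.1.head?
    let second := ((p.2.find? (fun i => some i ≠ g)).or (p.1.find? (fun i => some i ≠ g))).or
        ((List.range facts.length).find? (fun i => some i ≠ g))
    match g, second with
    | none, some s => [facts.getD s []]
    | some gi, some s => if gi < s then [facts.getD gi [], facts.getD s []] else [facts.getD s [], facts.getD gi []]
    | _, none => []   -- unreachable: len(facts) ≥ 2, so an index ≠ g always exists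

-- ===== PRECONDITION & SPEC =====
def Spec_select_state_qi_facts_py (facts : List (List (String × List String))) (complication_tags : List String) (out : List (List (String × List String))) : Prop := out = select_state_qi_facts_py_alt facts complication_tags
instance (facts : List (List (String × List String))) (complication_tags : List String) (out : List (List (String × List String))) : Decidable (Spec_select_state_qi_facts_py facts complication_tags out) := by unfold Spec_select_state_qi_facts_py; infer_instance

-- ===== CLAIM (what is proved, stated in full; the proofs are below) =====
def Claim_equal_select_state_qi_facts_py : Prop := ∀ (facts : List (List (String × List String))) (complication_tags : List String), Dom_select_state_qi_facts_py facts complication_tags → Spec_select_state_qi_facts_py facts complication_tags (select_state_qi_facts_py facts complication_tags)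

-- ===== LEMMAS AND PROOFS =====
theorem bScan_comp_nil (ct : List String) (facts : List (List (String × List String))) (i : Nat)
    (h : ct.isEmpty = true) : (bScan ct facts i).2 = [] := by
  induction facts generalizing i with
  | nil => rfl
  | cons f rest ih => simp [bScan, h, ih]

theorem aFindGen_eq_head (ct : List String) (facts : List (List (String × List String))) (i : Nat) :
    aFindGen facts i = (bScan ct facts i).1.head? := by
  induction facts generalizing i with
  | nil => rfl
  | cons f rest ih =>
    cases h : (pvTags f).contains "general" <;>
      simp only [aFindGen, bScan, h, if_true, if_false, Bool.false_eq_true,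
        List.head?_cons, ih]

theorem aFindComp_eq_find_aux (ct : List String) (g : Option Nat) (facts : List (List (String × List String))) (i : Nat)
    (hct : ct.isEmpty = false) :
    aFindComp ct g facts i = (bScan ct facts i).2.find? (fun j => some j ≠ g) := by
  induction facts generalizing i with
  | nil => rfl
  | cons f rest ih =>
    simp only [aFindComp, bScan, hct, Bool.not_false, Bool.true_and]
    by_cases hg : some i = g
    · cases ha : (pvTags f).any (fun t => ct.contains t) <;>
        simp [hg, ha, List.find?, ih]
    · cases ha : (pvTags f).any (fun t => ct.contains t) <;>
        simp [hg, ha, List.find?, ih]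

theorem aFindComp_eq_find (ct : List String) (g : Option Nat) (facts : List (List (String × List String))) (i : Nat) :
    (if !ct.isEmpty then aFindComp ct g facts i else none) =
      (bScan ct facts i).2.find? (fun j => some j ≠ g) := by
  cases hct : ct.isEmpty with
  | true => simp [bScan_comp_nil ct facts i hct]
  | false => simp [aFindComp_eq_find_aux ct g facts i hct]

theorem aFindGen2_eq_find (ct : List String) (g : Option Nat) (facts : List (List (String × List String))) (i : Nat) :
    aFindGen2 g facts i = (bScan ct facts i).1.find? (fun j => some j ≠ g) := by
  induction facts generalizing i with
  | nil => rfl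
  | cons f rest ih =>
    simp only [aFindGen2, bScan]
    by_cases hg : some i = g <;>
      cases hgen : (pvTags f).contains "general" <;>
        simp [hg, hgen, List.find?, ih]

theorem aFindIdx_eq_find (g : Option Nat) (l : List Nat) :
    aFindIdx g l = l.find? (fun i => some i ≠ g) := by
  induction l with
  | nil => rfl
  | cons i rest ih =>
    simp only [aFindIdx, List.find?]
    by_cases h : some i ≠ g <;> simp [h, ih]

-- the sorted-dedup of the two chosen indices, by cases on general_idx
theorem selected_pair (gi s : Nat) (h : gi ≠ s) :
    PySem.List.sorted (PySem.Set.ofList (([some gi, some s].filterMap id))) (fun x => x) false =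
      if gi < s then [gi, s] else [s, gi] := by
  have hset : PySem.Set.ofList [gi, s] = [gi, s] := by
    simp [PySem.Set.ofList, PySem.Set.add, PySem.Set.empty, Ne.symm h]
  have hfm : ([some gi, some s].filterMap id) = [gi, s] := rfl
  rw [hfm, hset]
  rcases lt_or_gt_of_ne h with hlt | hgt
  · rw [if_pos hlt]
    exact PySem.List.sorted_eq_of_perm_of_pairwise_lt _ _ _ (List.Perm.refl _)
      (by simp [hlt])
  · rw [if_neg (by omega)]
    exact PySem.List.sorted_eq_of_perm_of_pairwise_lt _ _ _ (List.Perm.swap _ _ _)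
      (by simp [hgt])

-- ===== VERDICT (by name: the statement is the Claim_ definition above) =====
theorem select_state_qi_facts_py_spec : Claim_equal_select_state_qi_facts_py := by
  intro facts ct _
  unfold Spec_select_state_qi_facts_py select_state_qi_facts_py select_state_qi_facts_py_alt
  by_cases hlen : facts.length < 2
  · simp [hlen]
  · simp only [if_neg hlen]
    have h2 : 2 ≤ facts.length := by omega
    rw [aFindGen_eq_head ct facts 0]
    set g := (bScan ct facts 0).1.head? with hgdef
    rw [aFindComp_eq_find ct g facts 0, aFindGen2_eq_find ct g facts 0, aFindIdx_eq_find g]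
    set c1 := (bScan ct facts 0).2.find? (fun j => some j ≠ g) with hc1
    set c2 := (bScan ct facts 0).1.find? (fun j => some j ≠ g) with hc2
    set c3 := (List.range facts.length).find? (fun i => some i ≠ g) with hc3
    have hsecond : (match (match c1 with | none => c2 | some j => some j) with
        | none => c3 | some j => some j) = (c1.or c2).or c3 := by
      cases c1 <;> cases c2 <;> rfl
    -- the final fallback always finds an index: range has ≥ 2 elements, g blocks at most one
    have hc3some : c3.isSome := by
      rw [hc3, List.find?_isSome]
      rcases g with _ | gi
      · exact ⟨0, by simp [List.mem_range]; omega⟩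
      · by_cases h0 : gi = 0
        · exact ⟨1, by simp [List.mem_range, h0]; omega⟩
        · exact ⟨0, by simp [List.mem_range, Ne.symm h0]; omega⟩
    rw [hsecond]
    rcases hsec : (c1.or c2).or c3 with _ | s
    · exfalso
      rcases hx1 : c1 with _ | x <;> rcases hx2 : c2 with _ | y <;>
        rw [hx1, hx2] at hsec <;> simp [Option.or] at hsec
      rw [hsec] at hc3some; simp at hc3some
    · -- the chosen second index differs from g, whichever branch supplied it
      have hne : some s ≠ g := by
        rcases hx1 : c1 with _ | x <;> rcases hx2 : c2 with _ | y <;>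
          rw [hx1, hx2] at hsec <;> simp only [Option.or] at hsec
        · rw [hsec] at hc3
          have := List.find?_some hc3.symm
          simpa using this
        · cases hsec
          have := List.find?_some (hc2.symm.trans hx2)
          simpa using this
        · cases hsec
          have := List.find?_some (hc1.symm.trans hx1)
          simpa using this
        · cases hsec
          have := List.find?_some (hc1.symm.trans hx1)
          simpa using this
      rcases g with _ | gi
      · rfl
      · have hne' : gi ≠ s := fun h => hne (by simp [h])
        show (PySem.List.sorted (PySem.Set.ofList (([some gi, some s].filterMap id))) (fun x => x) false).map
            (fun i => facts.getD i []) = _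
        rw [selected_pair gi s hne']
        by_cases hlt : gi < s <;> simp [hlt]
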